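-- pv_equiv track=rewrite | github.com/samek571/NAIL062-SAT-solver | sat.py | sat_to_board
-- ===== SOURCE A (Python) =====
-- def sat_to_board(sat_output, n, base):
--     board = [[0 for _ in range(n)] for _ in range(n)]
--
--     for line in sat_output.strip().split('\n'):
--         if line.startswith('v'):
--             variables = line.strip().split()[1:]  # parsing purposes only
--             for var in variables:
--                 v = int(var)
--                 if v > 0:
--                     v_index = v - base - 1
--                     i = v_index // n
--                     j = v_index % n
--                     if 0 <= i < n and 0 <= j < n:
--                         board[i][j] = 1
--     return board
-- ===== SOURCE B (Python) =====
-- def sat_to_board(sat_output, n, base):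
--     trues = set()
--     for line in sat_output.strip().split('\n'):
--         if line.startswith('v'):
--             for tok in line.strip().split()[1:]:
--                 v = int(tok)
--                 if v > 0:
--                     trues.add(v)
--     return [[1 if base + 1 + i * n + j in trues else 0 for j in range(n)]
--             for i in range(n)]
-- ===== Notes on version B (the rewrite author's own statement) =====
-- stated objective: idiomatic
-- what changed: A scatters each positive SAT variable into a mutable n×n board via v_index//n and v_index%n; B instead collects all positive variables into a set in one pass and then builds the board with a nested comprehension testing 'base+1+i*n+j in trues' per cell, inverting the control flow from scatter-into-cells to gather-then-test.
import Mathlib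
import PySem

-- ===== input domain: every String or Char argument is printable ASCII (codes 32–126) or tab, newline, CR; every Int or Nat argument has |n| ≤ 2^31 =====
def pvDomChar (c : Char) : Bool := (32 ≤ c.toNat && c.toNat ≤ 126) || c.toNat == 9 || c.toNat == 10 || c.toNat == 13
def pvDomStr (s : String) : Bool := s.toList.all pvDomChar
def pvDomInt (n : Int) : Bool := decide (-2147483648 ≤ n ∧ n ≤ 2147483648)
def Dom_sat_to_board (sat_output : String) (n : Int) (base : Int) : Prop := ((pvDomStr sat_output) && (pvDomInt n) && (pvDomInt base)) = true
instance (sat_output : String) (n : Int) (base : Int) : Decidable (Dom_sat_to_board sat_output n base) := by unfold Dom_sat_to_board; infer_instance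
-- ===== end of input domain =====

-- B inverts A's control flow: it collects the positive variables into a set and then builds the
-- board cell-by-cell with a membership test (objective: idiomatic; same return value on Pre_).

-- ===== PORT A =====
-- body of A's inner 'for var in variables' loop (ofStr? = none is Python's ValueError, excluded by Pre_)
def satA_var (n : Int) (base : Int) (board : List (List Int)) (var : String) : List (List Int) :=
  match PySem.Int.ofStr? var with
  | none => board
  | some v =>
    if v > 0 then
      let v_index := v - base - 1
      let i := PySem.Int.floordiv v_index n
      let j := PySem.Int.mod v_index n
      if 0 ≤ i ∧ i < n ∧ 0 ≤ j ∧ j < n then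
        board.set i.toNat ((board.getD i.toNat []).set j.toNat 1)
      else board
    else board

-- body of A's 'for line in …' loop
def satA_line (n : Int) (base : Int) (board : List (List Int)) (line : String) : List (List Int) :=
  if PySem.Str.startswith line "v" then
    ((PySem.Str.split₀ (PySem.Str.strip line)).drop 1).foldl (satA_var n base) board
  else board

def sat_to_board (sat_output : String) (n : Int) (base : Int) : List (List Int) :=
  let board : List (List Int) :=
    (PySem.List.pyRange 0 n 1).map (fun _ => (PySem.List.pyRange 0 n 1).map (fun _ => (0 : Int)))
  (((PySem.Str.split? (PySem.Str.strip sat_output) "\n").getD []).foldl (satA_line n base) board)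

-- ===== PORT B =====
-- body of B's inner token loop: collect positive variables into the set
def satB_tok (trues : PySem.Set Int) (tok : String) : PySem.Set Int :=
  match PySem.Int.ofStr? tok with
  | none => trues
  | some v => if v > 0 then PySem.Set.add trues v else trues

def satB_line (trues : PySem.Set Int) (line : String) : PySem.Set Int :=
  if PySem.Str.startswith line "v" then
    ((PySem.Str.split₀ (PySem.Str.strip line)).drop 1).foldl satB_tok trues
  else trues

def sat_to_board_alt (sat_output : String) (n : Int) (base : Int) : List (List Int) :=
  let trues : PySem.Set Int :=
    ((PySem.Str.split? (PySem.Str.strip sat_output) "\n").getD []).foldl satB_line PySem.Set.empty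
  (PySem.List.pyRange 0 n 1).map (fun i =>
    (PySem.List.pyRange 0 n 1).map (fun j =>
      if PySem.Set.contains trues (base + 1 + i * n + j) then 1 else 0))

-- ===== PRECONDITION & SPEC =====
-- Pre_ excludes exactly the inputs where Python A raises: a token of a 'v'-line that int() rejects
-- (ValueError), and n = 0 together with a positive parsed variable (ZeroDivisionError from v_index // n).
def Pre_sat_to_board (sat_output : String) (n : Int) (base : Int) : Prop :=
  ∀ l ∈ (PySem.Str.split? (PySem.Str.strip sat_output) "\n").getD [],
    PySem.Str.startswith l "v" = true →
    ∀ t ∈ (PySem.Str.split₀ (PySem.Str.strip l)).drop 1,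
      (PySem.Int.ofStr? t).isSome ∧ (n = 0 → ∀ v, PySem.Int.ofStr? t = some v → v ≤ 0)
instance (sat_output : String) (n : Int) (base : Int) : Decidable (Pre_sat_to_board sat_output n base) := by unfold Pre_sat_to_board; infer_instance

def pvWitness_sat_to_board : String × Int × Int := ("v 1 3\nv -4 0\nc done", 2, 0)

def Spec_sat_to_board (sat_output : String) (n : Int) (base : Int) (out : List (List Int)) : Prop := out = sat_to_board_alt sat_output n base
instance (sat_output : String) (n : Int) (base : Int) (out : List (List Int)) : Decidable (Spec_sat_to_board sat_output n base out) := by unfold Spec_sat_to_board; infer_instance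

-- ===== CLAIM (what is proved, stated in full; the proofs are below) =====
def Claim_equal_sat_to_board : Prop := ∀ (sat_output : String) (n : Int) (base : Int), Dom_sat_to_board sat_output n base → Pre_sat_to_board sat_output n base → Spec_sat_to_board sat_output n base (sat_to_board sat_output n base)
-- ===== LEMMAS AND PROOFS =====

-- the token "matches cell (i, j)" predicate both programs realise
def tmatch (n : Int) (base : Int) (i j : Nat) (t : String) : Bool :=
  match PySem.Int.ofStr? t with
  | none => false
  | some v => decide (0 < v ∧ v = base + 1 + (i : Int) * n + (j : Int))

def grid (n : Int) (f : Nat → Nat → Bool) : List (List Int) :=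
  (List.range n.toNat).map (fun i => (List.range n.toNat).map (fun j => if f i j then (1 : Int) else 0))

theorem grid_congr {n : Int} {f g : Nat → Nat → Bool}
    (h : ∀ i < n.toNat, ∀ j < n.toNat, f i j = g i j) : grid n f = grid n g := by
  unfold grid
  refine List.map_congr_left ?_
  intro i hi
  refine List.map_congr_left ?_
  intro j hj
  rw [h i (List.mem_range.mp hi) j (List.mem_range.mp hj)]

theorem grid_or_false {n : Int} (f : Nat → Nat → Bool) :
    grid n f = grid n (fun i j => f i j || false) := grid_congr (by simp)

theorem grid_set {n : Int} {f : Nat → Nat → Bool} {a b : Nat}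
    (ha : a < n.toNat) (hb : b < n.toNat) :
    (grid n f).set a (((grid n f).getD a []).set b 1)
      = grid n (fun i j => f i j || (decide (i = a) && decide (j = b))) := by
  have hga : (grid n f).getD a []
      = (List.range n.toNat).map (fun j => if f a j then (1 : Int) else 0) := by
    unfold grid
    rw [List.getD_eq_getElem _ _ (by simpa using ha)]
    simp
  rw [hga]
  have hrow : ((List.range n.toNat).map (fun j => if f a j then (1 : Int) else 0)).set b 1
      = (List.range n.toNat).map (fun j => if f a j || decide (j = b) then (1 : Int) else 0) := by
    apply List.ext_getElem
    · simp
    · intro j hj1 hj2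
      simp only [List.length_set, List.length_map, List.length_range] at hj1
      rw [List.getElem_set]
      by_cases hjb : j = b
      · subst hjb; simp
      · simp [hjb]
        exact fun h => absurd h.symm hjb
  rw [hrow]
  apply List.ext_getElem
  · simp [grid]
  · intro i hi1 hi2
    simp only [grid, List.length_set, List.length_map, List.length_range] at hi1 hi2
    rw [List.getElem_set]
    by_cases hia : i = a
    · subst hia
      simp [grid, hi2]
    · simp [grid, hia]
      exact fun h => absurd h.symm hia

theorem div_mod_unique {n vi i0 j0 : Int} {i j : Nat}
    (hn : 0 < n) (hij : vi = (i : Int) * n + (j : Int)) (hjn : (j : Int) < n)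
    (hdec : i0 * n + j0 = vi) (hj0 : 0 ≤ j0) (hj0n : j0 < n) :
    (i : Int) = i0 ∧ (j : Int) = j0 := by
  have hjnn : (0 : Int) ≤ (j : Int) := by positivity
  have hd : ((i : Int) - i0) * n = j0 - (j : Int) := by
    linear_combination -hij - hdec
  have hzero : (i : Int) - i0 = 0 := by
    rcases lt_trichotomy ((i : Int) - i0) 0 with h | h | h
    · have : ((i : Int) - i0) * n ≤ (-1) * n :=
        mul_le_mul_of_nonneg_right (by omega) (le_of_lt hn)
      nlinarith
    · exact h
    · have : (1 : Int) * n ≤ ((i : Int) - i0) * n :=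
        mul_le_mul_of_nonneg_right (by omega) (le_of_lt hn)
      nlinarith
  have hd' := hd
  rw [hzero, zero_mul] at hd'
  exact ⟨by omega, by omega⟩

theorem satA_var_grid (n base : Int) (f : Nat → Nat → Bool) (t : String) :
    satA_var n base (grid n f) t = grid n (fun i j => f i j || tmatch n base i j t) := by
  unfold satA_var tmatch
  cases hof : PySem.Int.ofStr? t with
  | none => exact grid_or_false f
  | some v =>
    simp only
    by_cases hv : v > 0
    · simp only [if_pos hv]
      set vi := v - base - 1 with hvi
      set i0 := PySem.Int.floordiv vi n with hi0
      set j0 := PySem.Int.mod vi n with hj0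
      have hdec : i0 * n + j0 = vi := PySem.Int.floordiv_mul_add_mod vi n
      by_cases hg : 0 ≤ i0 ∧ i0 < n ∧ 0 ≤ j0 ∧ j0 < n
      · rw [if_pos hg]
        obtain ⟨h1, h2, h3, h4⟩ := hg
        have hn : 0 < n := lt_of_le_of_lt h1 h2
        have hai : i0.toNat < n.toNat := by omega
        have hbj : j0.toNat < n.toNat := by omega
        rw [grid_set hai hbj]
        apply grid_congr
        intro i hi j hj
        congr 1
        have hin : (i : Int) < n := by omega
        have hjn : (j : Int) < n := by omega
        rw [Bool.eq_iff_iff]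
        simp only [Bool.and_eq_true, decide_eq_true_eq]
        constructor
        · rintro ⟨hi', hj'⟩
          subst hi'; subst hj'
          refine ⟨hv, ?_⟩
          have e1 : ((i0.toNat : Nat) : Int) = i0 := by omega
          have e2 : ((j0.toNat : Nat) : Int) = j0 := by omega
          rw [e1, e2]
          linarith [hdec]
        · rintro ⟨_, hveq⟩
          have hij : vi = (i : Int) * n + (j : Int) := by linarith
          have h5 := div_mod_unique hn hij hjn hdec h3 h4
          exact ⟨by omega, by omega⟩
      · rw [if_neg hg]
        apply Eq.trans (grid_or_false f)
        apply grid_congr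
        intro i hi j hj
        congr 1
        rw [Bool.eq_iff_iff]
        simp only [Bool.false_eq_true, false_iff, decide_eq_true_eq, not_and]
        intro _ hveq
        exfalso
        have hn : 0 < n := by
          by_cases h : 0 < n
          · exact h
          · exfalso; omega
        have hin : (i : Int) < n := by omega
        have hjn : (j : Int) < n := by omega
        have hij : vi = (i : Int) * n + (j : Int) := by linarith
        have hj0' : 0 ≤ j0 := PySem.Int.mod_nonneg vi hn
        have hj0n : j0 < n := PySem.Int.mod_lt vi hn
        have h5 := div_mod_unique hn hij hjn hdec hj0' hj0n
        apply hg
        refine ⟨by omega, by omega, hj0', hj0n⟩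
    · simp only [if_neg hv]
      apply Eq.trans (grid_or_false f)
      apply grid_congr
      intro i _ j _
      congr 1
      rw [Bool.eq_iff_iff]
      simp only [Bool.false_eq_true, false_iff, decide_eq_true_eq, not_and]
      intro h0v
      omega

theorem foldl_satA_var (n base : Int) (toks : List String) (f : Nat → Nat → Bool) :
    toks.foldl (satA_var n base) (grid n f)
      = grid n (fun i j => f i j || toks.any (tmatch n base i j)) := by
  induction toks generalizing f with
  | nil => simpa using grid_or_false f
  | cons t ts ih =>
    rw [List.foldl_cons, satA_var_grid, ih]
    apply grid_congr
    intro i _ j _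
    simp [Bool.or_assoc]

theorem foldl_satA_line (n base : Int) (lines : List String) (f : Nat → Nat → Bool) :
    lines.foldl (satA_line n base) (grid n f)
      = grid n (fun i j => f i j ||
          lines.any (fun l => PySem.Str.startswith l "v" &&
            ((PySem.Str.split₀ (PySem.Str.strip l)).drop 1).any (tmatch n base i j))) := by
  induction lines generalizing f with
  | nil => simpa using grid_or_false f
  | cons l ls ih =>
    rw [List.foldl_cons]
    by_cases hs : PySem.Str.startswith l "v" = true
    · rw [show satA_line n base (grid n f) l
            = ((PySem.Str.split₀ (PySem.Str.strip l)).drop 1).foldl (satA_var n base) (grid n f)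
          from by unfold satA_line; rw [if_pos hs]]
      rw [foldl_satA_var, ih]
      apply grid_congr
      intro i _ j _
      simp only [List.any_cons, hs, Bool.true_and, Bool.or_assoc]
    · rw [show satA_line n base (grid n f) l = grid n f
          from by unfold satA_line; rw [if_neg hs]]
      rw [ih]
      apply grid_congr
      intro i _ j _
      have hs' : PySem.Str.startswith l "v" = false := by
        simpa using hs
      simp only [List.any_cons, hs', Bool.false_and, Bool.false_or]

theorem satB_tok_none {s : PySem.Set Int} {t : String}
    (h : PySem.Int.ofStr? t = none) : satB_tok s t = s := by
  unfold satB_tok; rw [h]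

theorem satB_tok_some {s : PySem.Set Int} {t : String} {v : Int}
    (h : PySem.Int.ofStr? t = some v) :
    satB_tok s t = if v > 0 then PySem.Set.add s v else s := by
  unfold satB_tok; rw [h]

theorem mem_foldl_satB_tok (toks : List String) (s : PySem.Set Int) (x : Int) :
    x ∈ toks.foldl satB_tok s ↔
      x ∈ s ∨ ∃ t ∈ toks, PySem.Int.ofStr? t = some x ∧ 0 < x := by
  induction toks generalizing s with
  | nil => simp
  | cons t ts ih =>
    rw [List.foldl_cons, ih]
    cases hof : PySem.Int.ofStr? t with
    | none =>
      rw [satB_tok_none hof]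
      constructor
      · rintro (hx | ⟨u, hu, h1, h2⟩)
        · exact Or.inl hx
        · exact Or.inr ⟨u, List.mem_cons_of_mem _ hu, h1, h2⟩
      · rintro (hx | ⟨u, hu, h1, h2⟩)
        · exact Or.inl hx
        · rcases List.mem_cons.mp hu with rfl | hu'
          · rw [hof] at h1; cases h1
          · exact Or.inr ⟨u, hu', h1, h2⟩
    | some v =>
      by_cases hv : v > 0
      · rw [satB_tok_some hof, if_pos hv]
        constructor
        · rintro (hmem | ⟨u, hu, h1, h2⟩)
          · rcases (PySem.Set.mem_add s v x).mp hmem with h | rfl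
            · exact Or.inl h
            · exact Or.inr ⟨t, List.mem_cons_self, hof, hv⟩
          · exact Or.inr ⟨u, List.mem_cons_of_mem _ hu, h1, h2⟩
        · rintro (hx | ⟨u, hu, h1, h2⟩)
          · exact Or.inl ((PySem.Set.mem_add s v x).mpr (Or.inl hx))
          · rcases List.mem_cons.mp hu with rfl | hu'
            · rw [hof] at h1
              injection h1 with h1
              subst h1
              exact Or.inl ((PySem.Set.mem_add s v v).mpr (Or.inr rfl))
            · exact Or.inr ⟨u, hu', h1, h2⟩
      · rw [satB_tok_some hof, if_neg hv]
        constructor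
        · rintro (hx | ⟨u, hu, h1, h2⟩)
          · exact Or.inl hx
          · exact Or.inr ⟨u, List.mem_cons_of_mem _ hu, h1, h2⟩
        · rintro (hx | ⟨u, hu, h1, h2⟩)
          · exact Or.inl hx
          · rcases List.mem_cons.mp hu with rfl | hu'
            · rw [hof] at h1; injection h1 with h1; omega
            · exact Or.inr ⟨u, hu', h1, h2⟩

theorem mem_foldl_satB_line (lines : List String) (s : PySem.Set Int) (x : Int) :
    x ∈ lines.foldl satB_line s ↔
      x ∈ s ∨ ∃ l ∈ lines, PySem.Str.startswith l "v" = true ∧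
        ∃ t ∈ (PySem.Str.split₀ (PySem.Str.strip l)).drop 1,
          PySem.Int.ofStr? t = some x ∧ 0 < x := by
  induction lines generalizing s with
  | nil => simp
  | cons l ls ih =>
    rw [List.foldl_cons, ih]
    unfold satB_line
    by_cases hs : PySem.Str.startswith l "v" = true
    · rw [if_pos hs, mem_foldl_satB_tok]
      constructor
      · rintro ((hx | ⟨t, ht, h1, h2⟩) | ⟨u, hu, husw, rest⟩)
        · exact Or.inl hx
        · exact Or.inr ⟨l, List.mem_cons_self, hs, t, ht, h1, h2⟩
        · exact Or.inr ⟨u, List.mem_cons_of_mem _ hu, husw, rest⟩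
      · rintro (hx | ⟨u, hu, husw, rest⟩)
        · exact Or.inl (Or.inl hx)
        · rcases List.mem_cons.mp hu with rfl | hu'
          · exact Or.inl (Or.inr rest)
          · exact Or.inr ⟨u, hu', husw, rest⟩
    · rw [if_neg hs]
      constructor
      · rintro (hx | ⟨u, hu, husw, rest⟩)
        · exact Or.inl hx
        · exact Or.inr ⟨u, List.mem_cons_of_mem _ hu, husw, rest⟩
      · rintro (hx | ⟨u, hu, husw, rest⟩)
        · exact Or.inl hx
        · rcases List.mem_cons.mp hu with rfl | hu'
          · exact absurd husw hs
          · exact Or.inr ⟨u, hu', husw, rest⟩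

theorem tmatch_iff (n base : Int) (i j : Nat) (t : String) :
    tmatch n base i j t = true ↔
      (PySem.Int.ofStr? t = some (base + 1 + (i : Int) * n + (j : Int)) ∧
        0 < base + 1 + (i : Int) * n + (j : Int)) := by
  unfold tmatch
  cases hof : PySem.Int.ofStr? t with
  | none => simp
  | some v =>
    simp only [decide_eq_true_eq, Option.some.injEq]
    constructor
    · rintro ⟨h1, rfl⟩; exact ⟨rfl, h1⟩
    · rintro ⟨rfl, h⟩; exact ⟨h, rfl⟩

theorem init_board (n : Int) :
    ((PySem.List.pyRange 0 n 1).map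
        (fun _ => (PySem.List.pyRange 0 n 1).map (fun _ => (0 : Int))))
      = grid n (fun _ _ => false) := by
  simp [PySem.List.pyRange_one, grid, List.map_map, Function.comp_def, List.map_const']

theorem contains_iff_mem (s : PySem.Set Int) (x : Int) :
    PySem.Set.contains s x = true ↔ x ∈ s := by
  simp [PySem.Set.contains]

theorem alt_eq_grid (sat_output : String) (n base : Int) :
    sat_to_board_alt sat_output n base
      = grid n (fun i j => PySem.Set.contains
          (((PySem.Str.split? (PySem.Str.strip sat_output) "\n").getD []).foldl satB_line
            PySem.Set.empty)
          (base + 1 + (i : Int) * n + (j : Int))) := by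
  unfold sat_to_board_alt grid
  rw [PySem.List.pyRange_one]
  simp only [List.map_map, Int.sub_zero]
  apply List.map_congr_left
  intro k _
  simp only [Function.comp_def]
  apply List.map_congr_left
  intro k' _
  norm_num

-- ===== VERDICT (by name: the statement is the Claim_ definition above) =====
theorem sat_to_board_spec : Claim_equal_sat_to_board := by
  intro sat_output n base _ _
  unfold Spec_sat_to_board
  rw [alt_eq_grid]
  have hA : sat_to_board sat_output n base
      = ((PySem.Str.split? (PySem.Str.strip sat_output) "\n").getD []).foldl (satA_line n base)
          ((PySem.List.pyRange 0 n 1).map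
            (fun _ => (PySem.List.pyRange 0 n 1).map (fun _ => (0 : Int)))) := rfl
  rw [hA, init_board, foldl_satA_line]
  apply grid_congr
  intro i _ j _
  rw [Bool.eq_iff_iff, contains_iff_mem, mem_foldl_satB_line]
  simp only [List.any_eq_true, Bool.and_eq_true, Bool.false_or]
  constructor
  · rintro ⟨l, hl, ⟨hsw, t, ht, hm⟩⟩
    rw [tmatch_iff] at hm
    exact Or.inr ⟨l, hl, hsw, t, ht, hm.1, hm.2⟩
  · rintro (hx | ⟨l, hl, hsw, t, ht, h1, h2⟩)
    · exact absurd hx (by simp [PySem.Set.empty])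
    · exact ⟨l, hl, hsw, t, ht, (tmatch_iff n base i j t).mpr ⟨h1, h2⟩⟩
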